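-- pv_equiv track=rewrite | github.com/pypi-data/pypi-mirror-60 | packages/metaphor/metaphor-20.2.1.1.tar.gz/metaphor-20.2.1.1/metaphor/nn1/api/_api_service.py | _actionListMgmt
-- ===== SOURCE A (Python) =====
-- def _actionListMgmt(llist):
--     def replaceInList(mylist, target, substitute=[], exclusive=False):
--         try:
--             ind = mylist.index(target)
--             if exclusive:
--                 mylist = substitute
--             else:
--                 mylist = mylist[:ind] + substitute + mylist[ind+1:]
--         except ValueError:
--             pass
--         return mylist
--
--     llist = [val.lower() for val in llist]
--     llist = [val if not val.startswith('bs') else val.replace('bs', 'bootstrap') for val in llist]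
--
--     llist = replaceInList(llist, 'alltraintest', ['train', 'test', 'loo', 'lootest', 'bootstrap', 'bootstraptest'], True)
--     llist = replaceInList(llist, 'allall', ['train', 'test', 'loo', 'lootest', 'bootstrap', 'bootstraptest'], True)
--     llist = replaceInList(llist, 'all', ['train', 'test'])
--     llist = replaceInList(llist, 'looall', ['loo', 'lootest'])
--     llist = replaceInList(llist, 'lootraintest', ['loo', 'lootest'])
--     llist = replaceInList(llist, 'bootstrapall', ['bootstrap', 'bootstraptest'])
--     llist = replaceInList(llist, 'bootstratraintest', ['bootstrap', 'bootstraptest'])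
--
--     return llist
-- ===== SOURCE B (Python) =====
-- def _actionListMgmt(llist):
--     llist = [val.lower() for val in llist]
--     llist = [val if not val.startswith('bs') else val.replace('bs', 'bootstrap') for val in llist]
--     if 'alltraintest' in llist or 'allall' in llist:
--         return ['train', 'test', 'loo', 'lootest', 'bootstrap', 'bootstraptest']
--     subs = {
--         'all': ['train', 'test'],
--         'looall': ['loo', 'lootest'],
--         'lootraintest': ['loo', 'lootest'],
--         'bootstrapall': ['bootstrap', 'bootstraptest'],
--         'bootstratraintest': ['bootstrap', 'bootstraptest'],
--     }
--     out = []
--     for tok in llist: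
--         if tok in subs:
--             out.extend(subs.pop(tok))
--         else:
--             out.append(tok)
--     return out
-- ===== Notes on version B (the rewrite author's own statement) =====
-- stated objective: simpler
-- what changed: Replaces seven sequential index-and-splice passes with an early return for the two exclusive sentinels plus one left-to-right pass that expands the first occurrence of each remaining target via a substitution dict whose entries are popped once used.
import Mathlib
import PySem

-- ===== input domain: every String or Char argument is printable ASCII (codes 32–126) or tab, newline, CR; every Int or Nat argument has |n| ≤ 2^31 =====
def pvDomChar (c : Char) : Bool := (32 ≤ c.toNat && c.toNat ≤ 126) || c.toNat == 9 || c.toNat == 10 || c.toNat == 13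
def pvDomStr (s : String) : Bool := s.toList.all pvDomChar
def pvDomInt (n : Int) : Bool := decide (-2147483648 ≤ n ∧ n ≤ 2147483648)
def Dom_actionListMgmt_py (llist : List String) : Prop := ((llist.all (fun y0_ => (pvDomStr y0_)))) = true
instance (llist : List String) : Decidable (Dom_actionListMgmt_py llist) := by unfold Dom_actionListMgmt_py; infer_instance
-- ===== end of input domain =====

-- B replaces A's seven sequential index-and-splice passes by an early return for the two
-- exclusive sentinels plus ONE left-to-right pass over the tokens with a substitution
-- table whose entries are dropped once used (objective: simpler).

-- ===== PORT A =====
-- literal port of A's inner helper replaceInList (try: list.index → PySem.List.index?; slices via PySem.List.slice)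
def replaceInList (mylist : List String) (target : String) (substitute : List String)
    (exclusive : Bool) : List String :=
  match PySem.List.index? mylist target with
  | some ind =>
      if exclusive then substitute
      else PySem.List.slice mylist none (some (ind : Int)) ++ substitute
            ++ PySem.List.slice mylist (some ((ind : Int) + 1)) none
  | none => mylist

def actionListMgmt_py (llist : List String) : List String :=
  let l1 := llist.map (fun val => PySem.Str.lower val)
  let l2 := l1.map (fun val =>
    if !(PySem.Str.startswith val "bs") then val else PySem.Str.replace val "bs" "bootstrap")
  let l3 := replaceInList l2 "alltraintest"
      ["train", "test", "loo", "lootest", "bootstrap", "bootstraptest"] true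
  let l4 := replaceInList l3 "allall"
      ["train", "test", "loo", "lootest", "bootstrap", "bootstraptest"] true
  let l5 := replaceInList l4 "all" ["train", "test"] false
  let l6 := replaceInList l5 "looall" ["loo", "lootest"] false
  let l7 := replaceInList l6 "lootraintest" ["loo", "lootest"] false
  let l8 := replaceInList l7 "bootstrapall" ["bootstrap", "bootstraptest"] false
  replaceInList l8 "bootstratraintest" ["bootstrap", "bootstraptest"] false

-- ===== PORT B =====
-- Python dict → association list; lookup ('tok in subs' / 'subs[tok]') is first match and
-- pop removes that entry — exact here since the literal dict's keys are distinct.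
def altLookup : List (String × List String) → String → Option (List String)
  | [], _ => none
  | (k, v) :: rest, t => if k = t then some v else altLookup rest t

def altErase : List (String × List String) → String → List (String × List String)
  | [], _ => []
  | (k, v) :: rest, t => if k = t then rest else (k, v) :: altErase rest t

def altSubs : List (String × List String) :=
  [("all", ["train", "test"]),
   ("looall", ["loo", "lootest"]),
   ("lootraintest", ["loo", "lootest"]),
   ("bootstrapall", ["bootstrap", "bootstraptest"]),
   ("bootstratraintest", ["bootstrap", "bootstraptest"])]

-- the 'for tok in llist' loop of Source B, with its (subs, out) state
def altLoop (subs : List (String × List String)) (out : List String) :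
    List String → List String
  | [] => out
  | tok :: rest =>
      match altLookup subs tok with
      | some s => altLoop (altErase subs tok) (out ++ s) rest
      | none => altLoop subs (out ++ [tok]) rest

def actionListMgmt_py_alt (llist : List String) : List String :=
  let l1 := llist.map (fun val => PySem.Str.lower val)
  let l2 := l1.map (fun val =>
    if !(PySem.Str.startswith val "bs") then val else PySem.Str.replace val "bs" "bootstrap")
  if "alltraintest" ∈ l2 ∨ "allall" ∈ l2 then
    ["train", "test", "loo", "lootest", "bootstrap", "bootstraptest"]
  else altLoop altSubs [] l2

-- ===== PRECONDITION & SPEC =====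
def Spec_actionListMgmt_py (llist : List String) (out : List String) : Prop := out = actionListMgmt_py_alt llist
instance (llist : List String) (out : List String) : Decidable (Spec_actionListMgmt_py llist out) := by unfold Spec_actionListMgmt_py; infer_instance

-- ===== CLAIM (what is proved, stated in full; the proofs are below) =====
def Claim_equal_actionListMgmt_py : Prop := ∀ (llist : List String), Dom_actionListMgmt_py llist → Spec_actionListMgmt_py llist (actionListMgmt_py llist)

-- ===== LEMMAS AND PROOFS =====

-- structural characterisation of non-exclusive replaceInList
def srep (t : String) (s : List String) : List String → List String
  | [] => []
  | x :: L => if x = t then s ++ L else x :: srep t s L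

theorem rep_none (L : List String) (t : String) (s : List String) (e : Bool)
    (h : PySem.List.index? L t = none) : replaceInList L t s e = L := by
  unfold replaceInList; rw [h]

theorem rep_some (L : List String) (t : String) (s : List String) (i : Nat)
    (h : PySem.List.index? L t = some i) :
    replaceInList L t s false = L.take i ++ s ++ L.drop (i + 1) := by
  unfold replaceInList
  rw [h]
  simp only [Bool.false_eq_true, if_false]
  rw [PySem.List.slice_to_natCast L i,
      show ((i : Int) + 1) = ((i + 1 : Nat) : Int) by push_cast; ring,
      PySem.List.slice_from_natCast L (i + 1)]

theorem rep_eq (L : List String) (t : String) (s : List String) :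
    replaceInList L t s false = srep t s L := by
  induction L with
  | nil =>
    rw [rep_none [] t s false ((PySem.List.index?_eq_none_iff [] t).mpr (by simp))]
    rfl
  | cons x L ih =>
    by_cases hx : x = t
    · subst hx
      rw [rep_some (x :: L) x s 0 (PySem.List.index?_cons_self x L)]
      simp [srep]
    · rw [srep, if_neg hx, ← ih]
      cases hidx : PySem.List.index? L t with
      | none =>
        have hnone : PySem.List.index? (x :: L) t = none := by
          rw [PySem.List.index?_cons_of_ne L hx, hidx]; rfl
        rw [rep_none (x :: L) t s false hnone, rep_none L t s false hidx]
      | some i =>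
        have hsome : PySem.List.index? (x :: L) t = some (i + 1) := by
          rw [PySem.List.index?_cons_of_ne L hx, hidx]; rfl
        rw [rep_some (x :: L) t s (i + 1) hsome, rep_some L t s i hidx]
        simp

theorem rep_exclusive (L : List String) (t : String) (s : List String) :
    replaceInList L t s true = if t ∈ L then s else L := by
  rw [replaceInList]
  cases hidx : PySem.List.index? L t with
  | none =>
    have : t ∉ L := (PySem.List.index?_eq_none_iff L t).mp hidx
    simp [this]
  | some i =>
    have : t ∈ L := (PySem.List.index?_isSome_iff L t).mp (by rw [hidx]; rfl)
    simp [this]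

-- no substitute token is a key of the substitution table
def subsFresh (P : List (String × List String)) : Prop :=
  ∀ p ∈ P, ∀ y ∈ p.2, ∀ q ∈ P, y ≠ q.1

theorem altLookup_none_of_fresh (P : List (String × List String)) (y : String)
    (h : ∀ q ∈ P, y ≠ q.1) : altLookup P y = none := by
  induction P with
  | nil => rfl
  | cons p P ih =>
    obtain ⟨k, v⟩ := p
    rw [altLookup]
    have hk : y ≠ k := h (k, v) (by simp)
    rw [if_neg (fun h' => hk h'.symm)]
    exact ih (fun q hq => h q (by simp [hq]))

-- decomposition of a successful first-match lookup
theorem altLookup_some_decomp (P : List (String × List String)) (x : String)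
    (s : List String) (h : altLookup P x = some s) :
    ∃ P1 P2, P = P1 ++ (x, s) :: P2 ∧ ∀ q ∈ P1, q.1 ≠ x := by
  induction P with
  | nil => simp [altLookup] at h
  | cons p P ih =>
    obtain ⟨k, v⟩ := p
    rw [altLookup] at h
    by_cases hk : k = x
    · subst hk
      rw [if_pos rfl] at h
      injection h with h'
      subst h'
      exact ⟨[], P, rfl, by simp⟩
    · rw [if_neg hk] at h
      obtain ⟨P1, P2, hP, hne⟩ := ih h
      exact ⟨(k, v) :: P1, P2, by simp [hP], by
        intro q hq
        rcases List.mem_cons.mp hq with h' | h'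
        · subst h'; exact hk
        · exact hne q h'⟩

theorem altErase_append (P1 P2 : List (String × List String)) (x : String)
    (s : List String) (h : ∀ q ∈ P1, q.1 ≠ x) :
    altErase (P1 ++ (x, s) :: P2) x = P1 ++ P2 := by
  induction P1 with
  | nil => simp [altErase]
  | cons p P1 ih =>
    obtain ⟨k, v⟩ := p
    have hk : k ≠ x := h (k, v) (by simp)
    simp only [List.cons_append, altErase, if_neg hk]
    rw [ih (fun q hq => h q (by simp [hq]))]

-- the chain of non-exclusive sreps over a pair list, and the one-pass loop (no accumulator)
def chainS (P : List (String × List String)) (L : List String) : List String :=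
  P.foldl (fun acc p => srep p.1 p.2 acc) L

def loopS : List (String × List String) → List String → List String
  | _, [] => []
  | P, x :: L =>
      match altLookup P x with
      | some s => s ++ loopS (altErase P x) L
      | none => x :: loopS P L

theorem altLoop_eq (L : List String) : ∀ (P : List (String × List String))
    (out : List String), altLoop P out L = out ++ loopS P L := by
  induction L with
  | nil => intro P out; simp [altLoop, loopS]
  | cons x L ih =>
    intro P out
    rw [altLoop, loopS]
    cases h : altLookup P x with
    | some s => simp [ih]
    | none => simp [ih]

theorem chain_nil (P : List (String × List String)) : chainS P [] = [] := by
  induction P with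
  | nil => rfl
  | cons p P ih => simpa [chainS, srep] using ih

theorem chain_cons_notkey (P : List (String × List String)) (x : String)
    (L : List String) (h : altLookup P x = none) :
    chainS P (x :: L) = x :: chainS P L := by
  induction P generalizing L with
  | nil => rfl
  | cons p P ih =>
    obtain ⟨k, v⟩ := p
    rw [altLookup] at h
    by_cases hk : k = x
    · rw [if_pos hk] at h; exact absurd h (by simp)
    · rw [if_neg hk] at h
      have hx : x ≠ k := fun h' => hk h'.symm
      simp only [chainS, List.foldl_cons, srep, if_neg hx]
      have := ih (srep k v L) h
      simpa [chainS, srep] using this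

theorem chain_append_left (P : List (String × List String)) (s : List String)
    (M : List String) (h : ∀ y ∈ s, altLookup P y = none) :
    chainS P (s ++ M) = s ++ chainS P M := by
  induction s with
  | nil => simp
  | cons y s ih =>
    rw [List.cons_append, chain_cons_notkey P y _ (h y (by simp))]
    rw [ih (fun z hz => h z (by simp [hz]))]
    simp

theorem chain_eq (L : List String) : ∀ (P : List (String × List String)),
    subsFresh P → chainS P L = loopS P L := by
  induction L with
  | nil => intro P _; rw [chain_nil]; rfl
  | cons x L ih =>
    intro P hfresh
    cases hlk : altLookup P x with
    | none =>
      rw [chain_cons_notkey P x L hlk, loopS, hlk, ih P hfresh]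
    | some s =>
      obtain ⟨P1, P2, hP, hne⟩ := altLookup_some_decomp P x s hlk
      rw [loopS, hlk]
      subst hP
      -- left side: split the fold at the matched pair
      have h1 : altLookup P1 x = none :=
        altLookup_none_of_fresh P1 x (fun q hq h' => hne q hq h'.symm)
      have hsfresh : ∀ y ∈ s, ∀ q ∈ P1 ++ P2, y ≠ q.1 := by
        intro y hy q hq
        exact hfresh (x, s) (by simp) y hy q
          (by rcases List.mem_append.mp hq with h' | h' <;> simp [h'])
      calc chainS (P1 ++ (x, s) :: P2) (x :: L)
          = chainS P2 (srep x s (chainS P1 (x :: L))) := by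
            simp [chainS, List.foldl_append]
        _ = chainS P2 (s ++ chainS P1 L) := by
            rw [chain_cons_notkey P1 x L h1, srep, if_pos rfl]
        _ = s ++ chainS P2 (chainS P1 L) := by
            refine chain_append_left P2 s _ (fun y hy => ?_)
            exact altLookup_none_of_fresh P2 y
              (fun q hq => hsfresh y hy q (by simp [hq]))
        _ = s ++ chainS (P1 ++ P2) L := by simp [chainS, List.foldl_append]
        _ = s ++ loopS (altErase (P1 ++ (x, s) :: P2) x) L := by
            rw [altErase_append P1 P2 x s hne]
            rw [ih (P1 ++ P2) ?_]
            intro p hp y hy q hq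
            exact hfresh p (by
                rcases List.mem_append.mp hp with h' | h' <;> simp [h'])
              y hy q (by
                rcases List.mem_append.mp hq with h' | h' <;> simp [h'])

-- ===== VERDICT (by name: the statement is the Claim_ definition above) =====
theorem actionListMgmt_py_spec : Claim_equal_actionListMgmt_py := by
  intro llist _
  unfold Spec_actionListMgmt_py
  show actionListMgmt_py llist = actionListMgmt_py_alt llist
  simp only [actionListMgmt_py, actionListMgmt_py_alt]
  set L := (llist.map (fun val => PySem.Str.lower val)).map (fun val =>
    if !(PySem.Str.startswith val "bs") then val else PySem.Str.replace val "bs" "bootstrap")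
    with hL
  rw [rep_exclusive, rep_exclusive]
  by_cases h1 : "alltraintest" ∈ L
  · rw [if_pos h1]
    simp only [ite_self]
    rw [if_pos (Or.inl h1 : "alltraintest" ∈ L ∨ "allall" ∈ L)]
    decide
  · rw [if_neg h1]
    by_cases h2 : "allall" ∈ L
    · rw [if_pos h2, if_pos (Or.inr h2 : "alltraintest" ∈ L ∨ "allall" ∈ L)]
      decide
    · rw [if_neg h2, if_neg (by tauto : ¬("alltraintest" ∈ L ∨ "allall" ∈ L))]
      rw [rep_eq, rep_eq, rep_eq, rep_eq, rep_eq]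
      rw [altLoop_eq, List.nil_append]
      have := chain_eq L altSubs (by unfold subsFresh altSubs; decide)
      simpa [chainS, altSubs] using this
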